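-- pv_equiv track=rewrite | github.com/alexsalman/CSE272HW2 | prediction.py | common_items
-- ===== SOURCE A (Python) =====
-- def common_items(user_data, uid_data):
--     items = []
--     ht = {}
--     for (movie, rating) in user_data.items():
--         ht.setdefault(movie, 0)
--         ht[movie] += 1
--     for (movie, rating) in uid_data.items():
--         ht.setdefault(movie, 0)
--         ht[movie] += 1
--     for (k, v) in ht.items():
--         if v == 2:
--             items.append(k)
--     return items
-- ===== SOURCE B (Python) =====
-- def common_items(user_data, uid_data):
--     return [k for k in user_data if k in uid_data]
-- ===== Notes on version B (the rewrite author's own statement) =====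
-- stated objective: simpler
-- what changed: Dropped the two counting passes and the histogram dict entirely: B is a single comprehension over user_data keeping each key that is a member of uid_data.
import Mathlib
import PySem

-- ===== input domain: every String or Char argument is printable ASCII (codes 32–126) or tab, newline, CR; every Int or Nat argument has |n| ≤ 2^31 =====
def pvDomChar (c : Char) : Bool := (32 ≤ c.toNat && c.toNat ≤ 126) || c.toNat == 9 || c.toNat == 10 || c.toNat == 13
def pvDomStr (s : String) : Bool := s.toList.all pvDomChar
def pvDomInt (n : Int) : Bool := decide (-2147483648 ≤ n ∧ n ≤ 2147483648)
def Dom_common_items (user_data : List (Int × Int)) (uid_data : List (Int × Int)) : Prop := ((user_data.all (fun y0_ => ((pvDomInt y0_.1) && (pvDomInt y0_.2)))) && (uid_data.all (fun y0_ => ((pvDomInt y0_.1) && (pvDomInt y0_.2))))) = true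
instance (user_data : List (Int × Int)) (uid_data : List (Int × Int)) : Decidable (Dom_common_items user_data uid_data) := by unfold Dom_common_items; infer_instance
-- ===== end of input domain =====

-- B drops A's two counting passes over a histogram dict and keeps, in one pass, each user_data key that is a member of uid_data (objective: simpler).


-- ===== PORT A =====
def common_items (user_data : List (Int × Int)) (uid_data : List (Int × Int)) : List Int :=
  let ht : PySem.Dict Int Int :=
    user_data.foldl (fun ht p => (ht.setdefault p.1 0).modify p.1 0 (· + 1)) PySem.Dict.empty
  let ht :=
    uid_data.foldl (fun ht p => (ht.setdefault p.1 0).modify p.1 0 (· + 1)) ht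
  ht.items.foldl (fun items p => if p.2 == 2 then items ++ [p.1] else items) []

-- ===== PORT B =====
def common_items_alt (user_data : List (Int × Int)) (uid_data : List (Int × Int)) : List Int :=
  (user_data.map Prod.fst).filter (fun k => (uid_data.map Prod.fst).contains k)

-- ===== PRECONDITION & SPEC =====
-- Pre_ excludes association lists with duplicate keys: the Python arguments are dicts, whose
-- keys are unique, so such lists do not encode any input the Python function can receive.
def Pre_common_items (user_data : List (Int × Int)) (uid_data : List (Int × Int)) : Prop :=
  (user_data.map Prod.fst).Nodup ∧ (uid_data.map Prod.fst).Nodup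
instance (user_data : List (Int × Int)) (uid_data : List (Int × Int)) : Decidable (Pre_common_items user_data uid_data) := by unfold Pre_common_items; infer_instance
def pvWitness_common_items : (List (Int × Int)) × (List (Int × Int)) := ([(1, 4), (2, 5), (3, 1)], [(2, 2), (7, 0)])
def Spec_common_items (user_data : List (Int × Int)) (uid_data : List (Int × Int)) (out : List Int) : Prop := out = common_items_alt user_data uid_data
instance (user_data : List (Int × Int)) (uid_data : List (Int × Int)) (out : List Int) : Decidable (Spec_common_items user_data uid_data out) := by unfold Spec_common_items; infer_instance

-- ===== CLAIM (what is proved, stated in full; the proofs are below) =====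
def Claim_equal_common_items : Prop := ∀ (user_data : List (Int × Int)) (uid_data : List (Int × Int)), Dom_common_items user_data uid_data → Pre_common_items user_data uid_data → Spec_common_items user_data uid_data (common_items user_data uid_data)

-- ===== LEMMAS AND PROOFS =====

-- One counting step of A: `ht.setdefault(movie, 0); ht[movie] += 1` is a plain counter increment.
theorem step_eq (d : PySem.Dict Int Int) (k : Int) :
    (d.setdefault k 0).modify k 0 (· + 1) = d.modify k 0 (· + 1) := by
  by_cases h : d.contains k
  · rw [PySem.Dict.setdefault_of_contains _ _ h]
  · have h' : d.contains k = false := by simpa using h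
    rw [PySem.Dict.setdefault_of_not_contains _ _ h']
    have hins : ({ items := d.items ++ [(k, 0)] } : PySem.Dict Int Int) = d.insert k 0 := by
      rw [PySem.Dict.insert]; simp [h']
    have hmem : ∀ p ∈ d.items, p.1 ≠ k := by
      intro p hp hk
      rw [PySem.Dict.contains_iff_mem_keys] at h
      exact h (hk ▸ (PySem.Dict.mem_keys_of_mem_items (d := d) (p := p) hp))
    apply PySem.Dict.ext
    simp only [PySem.Dict.modify, PySem.Dict.insert, h']
    simp only [Bool.false_eq_true, if_false]
    simp only [hins, PySem.Dict.getD_insert_self,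
      PySem.Dict.getD_of_not_contains _ _ h', PySem.Dict.contains_insert_self, if_true]
    simp only [List.map_append, List.map_cons, List.map_nil, beq_self_eq_true, if_true]
    rw [List.map_congr_left (g := id) (by intro p hp; simp [hmem p hp])]
    simp

theorem common_items_eq_alt (u v : List (Int × Int))
    (hU : (u.map Prod.fst).Nodup) (hV : (v.map Prod.fst).Nodup) :
    common_items u v = common_items_alt u v := by
  set U := u.map Prod.fst with hUdef
  set V := v.map Prod.fst with hVdef
  have hfold : ∀ (l : List (Int × Int)) (d : PySem.Dict Int Int),
      l.foldl (fun ht p => (ht.setdefault p.1 0).modify p.1 0 (· + 1)) d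
        = (l.map Prod.fst).foldl (fun ht k => ht.modify k 0 (· + 1)) d := by
    intro l d
    rw [List.foldl_map]
    simp only [step_eq]
  unfold common_items
  simp only [hfold, ← List.foldl_append, ← hUdef, ← hVdef]
  rw [← PySem.Dict.counter_eq_foldl, PySem.Dict.items_counter]
  rw [PySem.List.foldl_append_if]
  rw [List.filter_map, List.map_map]
  simp only [List.nil_append, Function.comp_def]
  rw [PySem.Set.ofList_append, PySem.Set.ofList_eq_self_of_nodup _ hU,
    PySem.Set.update_eq_append_filter, List.filter_append]
  have h2 : ((PySem.Set.ofList V).filter (fun y => !(PySem.Set.contains U y))).filter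
      (fun k => ((List.count k (U ++ V) : Nat) : Int) == 2) = [] := by
    rw [List.filter_eq_nil_iff]
    intro k hk
    rw [List.mem_filter] at hk
    obtain ⟨hkV, hkU⟩ := hk
    have hkV' : k ∈ V := (PySem.Set.mem_ofList _ _).mp hkV
    have hkUn : k ∉ U := by simpa using hkU
    have : List.count k (U ++ V) = 1 := by
      rw [List.count_append, List.count_eq_zero_of_not_mem hkUn,
        List.count_eq_one_of_mem hV hkV']
    simp [this]
  have h1 : U.filter (fun k => ((List.count k (U ++ V) : Nat) : Int) == 2)
      = U.filter (fun k => V.contains k) := by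
    apply List.filter_congr
    intro k hk
    have hcU : List.count k U = 1 := List.count_eq_one_of_mem hU hk
    by_cases hkV : k ∈ V
    · have : List.count k (U ++ V) = 2 := by
        rw [List.count_append, hcU, List.count_eq_one_of_mem hV hkV]
      simp [this, hkV]
    · have : List.count k (U ++ V) = 1 := by
        rw [List.count_append, hcU, List.count_eq_zero_of_not_mem hkV]
      simp [this, hkV]
  rw [h2, h1]
  simp [common_items_alt, ← hUdef, ← hVdef]

-- ===== VERDICT (by name: the statement is the Claim_ definition above) =====
theorem common_items_spec : Claim_equal_common_items := by
  intro user_data uid_data _ hpre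
  exact common_items_eq_alt user_data uid_data hpre.1 hpre.2
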